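-- pv_equiv track=rewrite | github.com/0blackskull/app-api | app/routers/chat.py | extract_streaming_final_answer
-- ===== SOURCE A (Python) =====
-- def extract_streaming_final_answer(content: str, accumulated_content: str = "", last_sent_position: int = 0, streaming_complete: bool = False, pending_buffer: str = "") -> tuple[str, str, int, bool, str]:
--     """
--     Extract content within Final Answer tags for streaming, handling partial content and partial closing tags.
--     Returns (content_to_send, new_accumulated_content, new_last_sent_position, streaming_complete, new_pending_buffer).
--
--     Args:
--         content: Current chunk of content
--         accumulated_content: Previously accumulated content to check for complete tags
--         last_sent_position: Position in accumulated content where we last sent content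
--         streaming_complete: Whether streaming has already been completed
--         pending_buffer: Buffer holding potential partial closing tag from previous chunk
--
--     Returns:
--         Tuple of (content to send to UI, new accumulated content, new last sent position, streaming complete flag, new pending buffer)
--     """
--     start_tag = "<Final Answer>"
--     end_tag = "</Final Answer>"
--
--     # If streaming is already complete, don't send anything more
--     if streaming_complete:
--         return "", accumulated_content + content, last_sent_position, True, ""
--
--     # Update accumulated content
--     new_accumulated = accumulated_content + content
--
--     # Find start tag position
--     start_pos = new_accumulated.find(start_tag)
--     if start_pos == -1:
--         # No start tag found yet, don't send anything
--         return "", new_accumulated, last_sent_position, False, ""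
--
--     # Calculate content start position (after start tag)
--     content_start = start_pos + len(start_tag)
--
--     # Check if we're inside the Final Answer tags
--     if last_sent_position < content_start:
--         # We haven't started streaming yet, move to content start
--         last_sent_position = content_start
--
--     # Find end tag position
--     end_pos = new_accumulated.find(end_tag, start_pos)
--
--     if end_pos != -1:
--         # Complete end tag found, send remaining content up to end tag and mark as complete
--         content_to_send = new_accumulated[last_sent_position:end_pos]
--         return content_to_send, new_accumulated, end_pos, True, ""
--
--     # End tag not found yet, need to handle potential partial closing tag
--     current_content = new_accumulated[last_sent_position:]
--     content_to_send = ""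
--     new_pending_buffer = ""
--
--     # Add any pending buffer from previous chunk
--     if pending_buffer:
--         current_content = pending_buffer + current_content
--         # When we have a pending buffer, don't send any content until we can determine if it's a complete closing tag
--         # Just accumulate the content and continue
--         return "", new_accumulated, last_sent_position, False, ""
--     # Look for potential start of closing tag
--     i = 0
--     while i < len(current_content):
--         char = current_content[i]
--
--         if char == '<':
--             # Found '<', check if it could be start of closing tag
--             remaining = current_content[i:]
--
--             # Check if remaining content matches any prefix of the end tag
--             is_potential_closing = False
--             for j in range(1, min(len(end_tag) + 1, len(remaining) + 1)):
--                 if end_tag.startswith(remaining[:j]):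
--                     is_potential_closing = True
--                     if j == len(end_tag) and remaining[:j] == end_tag:
--                         # Complete closing tag found
--                         content_to_send += current_content[:i]
--                         return content_to_send, new_accumulated, last_sent_position + len(content_to_send), True, ""
--                     break
--
--             if is_potential_closing:
--                 # This could be a partial closing tag, buffer it
--                 content_to_send += current_content[:i]
--                 new_pending_buffer = remaining
--                 break
--             else:
--                 # Not a closing tag, continue
--                 i += 1
--         else:
--             i += 1
--
--     if not new_pending_buffer:
--         # No potential closing tag found, send all content
--         content_to_send = current_content
--         new_pending_buffer = ""
--
--     # Update last sent position
--     new_last_sent = last_sent_position + len(content_to_send)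
--
--     return content_to_send, new_accumulated, new_last_sent, False, new_pending_buffer
-- ===== SOURCE B (Python) =====
-- def extract_streaming_final_answer(content: str, accumulated_content: str = "", last_sent_position: int = 0, streaming_complete: bool = False, pending_buffer: str = "") -> tuple[str, str, int, bool, str]:
--     """Same extraction, but the character-by-character scan for a potential partial
--     closing tag is replaced by a single str.find('<') split."""
--     start_tag = "<Final Answer>"
--     end_tag = "</Final Answer>"
--     if streaming_complete:
--         return "", accumulated_content + content, last_sent_position, True, ""
--     new_accumulated = accumulated_content + content
--     start_pos = new_accumulated.find(start_tag)
--     if start_pos == -1: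
--         return "", new_accumulated, last_sent_position, False, ""
--     sent = max(last_sent_position, start_pos + len(start_tag))
--     end_pos = new_accumulated.find(end_tag, start_pos)
--     if end_pos != -1:
--         return new_accumulated[sent:end_pos], new_accumulated, end_pos, True, ""
--     if pending_buffer:
--         return "", new_accumulated, sent, False, ""
--     current = new_accumulated[sent:]
--     idx = current.find('<')
--     if idx == -1:
--         return current, new_accumulated, sent + len(current), False, ""
--     return current[:idx], new_accumulated, sent + idx, False, current[idx:]
-- ===== Notes on version B (the rewrite author's own statement) =====
-- stated objective: simpler
-- what changed: The character-by-character while loop with its nested prefix-matching for-j loop (which in fact always breaks at the first angle bracket) is replaced by a single str.find split of the remaining content at the first angle bracket, and the conditional last_sent_position update becomes a max().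
import Mathlib
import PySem

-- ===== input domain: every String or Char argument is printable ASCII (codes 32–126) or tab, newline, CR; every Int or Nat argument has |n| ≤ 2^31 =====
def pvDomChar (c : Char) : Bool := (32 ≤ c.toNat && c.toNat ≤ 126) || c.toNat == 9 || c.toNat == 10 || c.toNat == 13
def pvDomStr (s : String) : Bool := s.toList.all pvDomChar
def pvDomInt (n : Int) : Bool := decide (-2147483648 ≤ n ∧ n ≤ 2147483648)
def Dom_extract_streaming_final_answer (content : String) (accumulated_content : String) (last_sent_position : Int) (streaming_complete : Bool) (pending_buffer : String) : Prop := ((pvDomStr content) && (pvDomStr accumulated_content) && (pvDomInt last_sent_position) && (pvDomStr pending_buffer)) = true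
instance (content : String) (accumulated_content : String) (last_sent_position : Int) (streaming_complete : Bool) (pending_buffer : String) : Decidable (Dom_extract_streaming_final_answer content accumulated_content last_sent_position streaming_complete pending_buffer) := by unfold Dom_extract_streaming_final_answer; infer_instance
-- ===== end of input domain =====

-- ===== PORT A =====
-- One honest line: B collapses A's character-by-character partial-closing-tag scan
-- (while loop + nested prefix-matching for loop) into a single str.find split at the first angle bracket; simpler.
def pvTagStart : List Char := "<Final Answer>".toList
def pvTagEnd : List Char := "</Final Answer>".toList

-- inner `for j in range(1, min(len(end_tag)+1, len(remaining)+1))`: returns some j at the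
-- break (end_tag.startswith(remaining[:j])), none if the range is exhausted.
def pvInnerA (remaining : List Char) (j stop : Nat) : Option Nat :=
  if j < stop then
    if PySem.Chars.startswith pvTagEnd (remaining.take j) then some j
    else pvInnerA remaining (j + 1) stop
  else none
termination_by stop - j

-- the `while i < len(current_content)` loop (content_to_send is "" until the loop ends/breaks)
def pvLoopA (newAcc : List Char) (lastSent : Int) (cur : List Char) (i : Nat) :
    String × String × Int × Bool × String :=
  if h : i < cur.length then
    if cur[i] = '<' then
      let remaining := cur.drop i
      match pvInnerA remaining 1 (min (pvTagEnd.length + 1) (remaining.length + 1)) with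
      | some j =>
        if j = pvTagEnd.length ∧ remaining.take j = pvTagEnd then
          -- `return content_to_send, …, True, ""` (complete closing tag inside the scan)
          (String.ofList (cur.take i), String.ofList newAcc,
            lastSent + ((cur.take i).length : Int), true, "")
        else
          -- is_potential_closing: buffer `remaining`, break, fall through to the final return
          (String.ofList (cur.take i), String.ofList newAcc,
            lastSent + ((cur.take i).length : Int), false, String.ofList remaining)
      | none => pvLoopA newAcc lastSent cur (i + 1)
    else pvLoopA newAcc lastSent cur (i + 1)
  else
    -- loop ended, no pending buffer: send all of current_content
    (String.ofList cur, String.ofList newAcc, lastSent + (cur.length : Int), false, "")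
termination_by cur.length - i

def extract_streaming_final_answer (content : String) (accumulated_content : String) (last_sent_position : Int) (streaming_complete : Bool) (pending_buffer : String) : String × String × Int × Bool × String :=
  if streaming_complete then
    ("", String.ofList (accumulated_content.toList ++ content.toList), last_sent_position, true, "")
  else
    let newAcc := accumulated_content.toList ++ content.toList
    let startPos := PySem.Chars.find newAcc pvTagStart
    if startPos = -1 then
      ("", String.ofList newAcc, last_sent_position, false, "")
    else
      let contentStart := startPos + (pvTagStart.length : Int)
      let lastSent := if last_sent_position < contentStart then contentStart else last_sent_position
      let endPos := PySem.Chars.findFrom newAcc pvTagEnd startPos none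
      if endPos ≠ -1 then
        (String.ofList (PySem.Chars.slice newAcc (some lastSent) (some endPos)),
          String.ofList newAcc, endPos, true, "")
      else
        let current := PySem.Chars.slice newAcc (some lastSent) none
        if pending_buffer.toList ≠ [] then
          ("", String.ofList newAcc, lastSent, false, "")
        else
          pvLoopA newAcc lastSent current 0

-- ===== PORT B =====
def extract_streaming_final_answer_alt (content : String) (accumulated_content : String) (last_sent_position : Int) (streaming_complete : Bool) (pending_buffer : String) : String × String × Int × Bool × String :=
  if streaming_complete then
    ("", String.ofList (accumulated_content.toList ++ content.toList), last_sent_position, true, "")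
  else
    let newAcc := accumulated_content.toList ++ content.toList
    let startPos := PySem.Chars.find newAcc pvTagStart
    if startPos = -1 then
      ("", String.ofList newAcc, last_sent_position, false, "")
    else
      let sent := max last_sent_position (startPos + (pvTagStart.length : Int))
      let endPos := PySem.Chars.findFrom newAcc pvTagEnd startPos none
      if endPos ≠ -1 then
        (String.ofList (PySem.Chars.slice newAcc (some sent) (some endPos)),
          String.ofList newAcc, endPos, true, "")
      else if pending_buffer.toList ≠ [] then
        ("", String.ofList newAcc, sent, false, "")
      else
        let current := PySem.Chars.slice newAcc (some sent) none
        let idx := PySem.Chars.find current "<".toList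
        if idx = -1 then
          (String.ofList current, String.ofList newAcc, sent + (current.length : Int), false, "")
        else
          -- idx ≥ 0 here, so current[:idx] / current[idx:] are exactly take/drop
          (String.ofList (current.take idx.toNat), String.ofList newAcc, sent + idx, false,
            String.ofList (current.drop idx.toNat))

-- ===== PRECONDITION & SPEC =====
def Spec_extract_streaming_final_answer (content : String) (accumulated_content : String) (last_sent_position : Int) (streaming_complete : Bool) (pending_buffer : String) (out : String × String × Int × Bool × String) : Prop := out = extract_streaming_final_answer_alt content accumulated_content last_sent_position streaming_complete pending_buffer
instance (content : String) (accumulated_content : String) (last_sent_position : Int) (streaming_complete : Bool) (pending_buffer : String) (out : String × String × Int × Bool × String) : Decidable (Spec_extract_streaming_final_answer content accumulated_content last_sent_position streaming_complete pending_buffer out) := by unfold Spec_extract_streaming_final_answer; infer_instance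

-- ===== CLAIM (what is proved, stated in full; the proofs are below) =====
def Claim_equal_extract_streaming_final_answer : Prop := ∀ (content : String) (accumulated_content : String) (last_sent_position : Int) (streaming_complete : Bool) (pending_buffer : String), Dom_extract_streaming_final_answer content accumulated_content last_sent_position streaming_complete pending_buffer → Spec_extract_streaming_final_answer content accumulated_content last_sent_position streaming_complete pending_buffer (extract_streaming_final_answer content accumulated_content last_sent_position streaming_complete pending_buffer)

-- ===== LEMMAS AND PROOFS =====

lemma pv_if_lt_eq_max (l c : Int) : (if l < c then c else l) = max l c := by
  rw [max_def]; split_ifs <;> omega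

lemma pv_singleton_prefix (c : Char) (l : List Char) : [c] <+: l ↔ l[0]? = some c := by
  cases l with
  | nil => simp
  | cons x t => simp [List.cons_prefix_cons]; exact eq_comm


lemma pv_find_lt_eq (cur : List Char) (i : Nat) (hi : i < cur.length)
    (hc : cur[i] = '<') (hno : ∀ j < i, cur[j]? ≠ some '<') :
    PySem.Chars.find cur "<".toList = (i : Int) := by
  have hlt : "<".toList = ['<'] := rfl
  have hinf : "<".toList <:+: cur := by
    rw [hlt, List.singleton_infix_iff, ← hc]
    exact List.getElem_mem hi
  have hne := (PySem.Chars.find_ne_neg_one_iff cur "<".toList).mpr hinf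
  have hm1 := PySem.Chars.neg_one_le_find (s := cur) (sub := "<".toList)
  have h0 : 0 ≤ PySem.Chars.find cur "<".toList := by omega
  obtain ⟨hpre, hmin⟩ := PySem.Chars.find_spec h0
  have hfi : (PySem.Chars.find cur "<".toList).toNat = i := by
    rcases lt_trichotomy (PySem.Chars.find cur "<".toList).toNat i with h | h | h
    · have := (pv_singleton_prefix '<' (cur.drop _)).mp hpre
      rw [List.getElem?_drop] at this
      exact absurd (by simpa using this) (hno _ h)
    · exact h
    · refine absurd ((pv_singleton_prefix '<' (cur.drop i)).mpr ?_) (hmin i h)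
      rw [List.getElem?_drop]
      simp [List.getElem?_eq_getElem hi, hc]
  omega

lemma pv_find_none (cur : List Char) (hno : ∀ j < cur.length, cur[j]? ≠ some '<') :
    PySem.Chars.find cur "<".toList = -1 := by
  rw [PySem.Chars.find_eq_neg_one_iff]
  have hlt : "<".toList = ['<'] := rfl
  rw [hlt, List.singleton_infix_iff]
  intro hmem
  obtain ⟨j, hj, he⟩ := List.mem_iff_getElem.mp hmem
  exact hno j hj (by simp [List.getElem?_eq_getElem hj, he])

lemma pvLoopA_eq (na : List Char) (ls : Int) :
    ∀ (n : Nat) (cur : List Char) (i : Nat), cur.length - i ≤ n → i ≤ cur.length →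
    (∀ j < i, cur[j]? ≠ some '<') →
    pvLoopA na ls cur i =
      (if PySem.Chars.find cur "<".toList = -1 then
        (String.ofList cur, String.ofList na, ls + (cur.length : Int), false, "")
      else
        (String.ofList (cur.take (PySem.Chars.find cur "<".toList).toNat), String.ofList na,
          ls + PySem.Chars.find cur "<".toList, false,
          String.ofList (cur.drop (PySem.Chars.find cur "<".toList).toNat))) := by
  intro n
  induction n with
  | zero =>
    intro cur i h1 h2 hno
    have hi : i = cur.length := by omega
    subst hi
    rw [pvLoopA, dif_neg (by omega), if_pos (pv_find_none cur hno)]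
  | succ n ih =>
    intro cur i h1 h2 hno
    by_cases h : i < cur.length
    · by_cases hc : cur[i] = '<'
      · have hrem : (cur.drop i).take 1 = ['<'] := by
          rw [← List.getElem_cons_drop h]
          simp [hc]
        have hinner : pvInnerA (cur.drop i) 1
            (min (pvTagEnd.length + 1) ((cur.drop i).length + 1)) = some 1 := by
          rw [pvInnerA, if_pos (by simp [pvTagEnd]; omega), hrem,
            if_pos (by decide)]
        have hfind := pv_find_lt_eq cur i h hc hno
        rw [pvLoopA]
        simp only [dif_pos h, if_pos hc, hinner]
        rw [if_neg (by simp [pvTagEnd]), hfind,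
          if_neg (by omega)]
        simp [List.length_take, Nat.min_eq_left (le_of_lt h)]
      · rw [pvLoopA]
        simp only [dif_pos h, if_neg hc]
        exact ih cur (i + 1) (by omega) (by omega) (fun j hj => by
          rcases Nat.lt_succ_iff_lt_or_eq.mp hj with hj | hj
          · exact hno j hj
          · subst hj
            simp [List.getElem?_eq_getElem h]
            exact hc)
    · have hi : i = cur.length := by omega
      subst hi
      rw [pvLoopA, dif_neg (by omega), if_pos (pv_find_none cur hno)]

lemma pvLoopA_zero (na : List Char) (ls : Int) (cur : List Char) :
    pvLoopA na ls cur 0 =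
      (if PySem.Chars.find cur "<".toList = -1 then
        (String.ofList cur, String.ofList na, ls + (cur.length : Int), false, "")
      else
        (String.ofList (cur.take (PySem.Chars.find cur "<".toList).toNat), String.ofList na,
          ls + PySem.Chars.find cur "<".toList, false,
          String.ofList (cur.drop (PySem.Chars.find cur "<".toList).toNat))) :=
  pvLoopA_eq na ls cur.length cur 0 (by omega) (by omega)
    (fun j hj => absurd hj (Nat.not_lt_zero j))

-- ===== VERDICT (by name: the statement is the Claim_ definition above) =====
theorem extract_streaming_final_answer_spec : Claim_equal_extract_streaming_final_answer := by
  intro content accumulated_content last_sent_position streaming_complete pending_buffer _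
  unfold Spec_extract_streaming_final_answer
  simp only [extract_streaming_final_answer, extract_streaming_final_answer_alt,
    pv_if_lt_eq_max]
  split_ifs with h1 h2 h3 h4 h5
  · rfl
  · rfl
  · rfl
  · rfl
  · rw [pvLoopA_zero, if_pos h5]
  · rw [pvLoopA_zero, if_neg h5]
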